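-- pv_equiv track=rewrite | github.com/madeja7396/AgentRetreive | src/agentretrieve/query/engine.py | _has_lines_within_window
-- ===== SOURCE A (Python) =====
-- def _has_lines_within_window(line_lists: list[list[int]], window: int) -> bool:
--     events: list[tuple[int, int]] = []
--     for term_idx, lines in enumerate(line_lists):
--         events.extend((line_no, term_idx) for line_no in lines)
--     events.sort(key=lambda x: x[0])
--
--     term_count = len(line_lists)
--     covered = 0
--     counts = [0] * term_count
--     left = 0
--
--     for right, (line_right, term_idx_right) in enumerate(events):
--         if counts[term_idx_right] == 0:
--             covered += 1
--         counts[term_idx_right] += 1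
--
--         while covered == term_count and left <= right:
--             line_left = events[left][0]
--             if line_right - line_left <= window:
--                 return True
--             term_idx_left = events[left][1]
--             counts[term_idx_left] -= 1
--             if counts[term_idx_left] == 0:
--                 covered -= 1
--             left += 1
--
--     return False
-- ===== SOURCE B (Python) =====
-- def _has_lines_within_window(line_lists: list[list[int]], window: int) -> bool:
--     # Anchor enumeration: a qualifying selection exists iff some line L (its minimum)
--     # has, for every term, a line inside [L, L + window].
--     anchors = sorted({line for lines in line_lists for line in lines})
--     for anchor in anchors:
--         if all(any(anchor <= x <= anchor + window for x in lines) for lines in line_lists):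
--             return True
--     return False
-- ===== Notes on version B (the rewrite author's own statement) =====
-- stated objective: simpler
-- what changed: Replaces the merged-event sort plus two-pointer sliding window with counts/covered bookkeeping by a direct anchor enumeration: for each distinct line L, check every term has a line in [L, L+window].
import Mathlib
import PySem

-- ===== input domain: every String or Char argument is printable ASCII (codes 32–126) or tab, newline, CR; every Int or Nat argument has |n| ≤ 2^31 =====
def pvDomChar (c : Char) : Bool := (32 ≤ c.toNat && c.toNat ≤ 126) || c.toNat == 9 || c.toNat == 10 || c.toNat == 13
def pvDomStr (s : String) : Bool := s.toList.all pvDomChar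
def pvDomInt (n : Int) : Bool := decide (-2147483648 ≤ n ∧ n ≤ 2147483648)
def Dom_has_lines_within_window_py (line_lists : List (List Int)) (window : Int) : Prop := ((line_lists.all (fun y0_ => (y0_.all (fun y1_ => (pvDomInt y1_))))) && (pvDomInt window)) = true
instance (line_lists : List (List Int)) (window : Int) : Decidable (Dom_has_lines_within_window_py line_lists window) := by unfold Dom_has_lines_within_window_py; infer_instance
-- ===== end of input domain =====

-- B replaces A's merged-event sort + two-pointer sliding window by a simpler anchor
-- enumeration; equivalence of return values is proved for all inputs (both are total).

-- ===== PORT A =====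
-- the inner `while covered == term_count and left <= right` loop; returns none when the
-- Python `return True` fires, otherwise the loop's final (counts, covered, left) state
def pvAShrink (es : List (Int × Int)) (window termCount lineRight : Int) (right : Nat)
    (counts : List Int) (covered : Int) (left : Nat) : Option (List Int × Int × Nat) :=
  if h : covered = termCount ∧ left ≤ right then
    let lineLeft := (PySem.List.pyGetD es (left : Int) (0, 0)).1
    if lineRight - lineLeft ≤ window then none
    else
      let termLeft := (PySem.List.pyGetD es (left : Int) (0, 0)).2
      let counts' := PySem.List.pySetD counts termLeft (PySem.List.pyGetD counts termLeft 0 - 1)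
      let covered' := if PySem.List.pyGetD counts' termLeft 0 = 0 then covered - 1 else covered
      pvAShrink es window termCount lineRight right counts' covered' (left + 1)
  else some (counts, covered, left)
termination_by right + 1 - left
decreasing_by omega

-- the outer `for right, (line_right, term_idx_right) in enumerate(events)` loop
def pvAScan (es : List (Int × Int)) (window termCount : Int) :
    List (Int × Int) → Nat → List Int → Int → Nat → Bool
  | [], _, _, _, _ => false
  | e :: rest, right, counts, covered, left =>
    let covered1 := if PySem.List.pyGetD counts e.2 0 = 0 then covered + 1 else covered
    let counts1 := PySem.List.pySetD counts e.2 (PySem.List.pyGetD counts e.2 0 + 1)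
    match pvAShrink es window termCount e.1 right counts1 covered1 left with
    | none => true
    | some st => pvAScan es window termCount rest (right + 1) st.1 st.2.1 st.2.2

def has_lines_within_window_py (line_lists : List (List Int)) (window : Int) : Bool :=
  let events := (PySem.List.enumerate line_lists).flatMap (fun p => p.2.map (fun l => (l, p.1)))
  let es := PySem.List.sorted events (fun x => x.1)
  let termCount : Int := (line_lists.length : Int)
  pvAScan es window termCount es 0 (PySem.List.pyRepeat [(0 : Int)] termCount) 0 0

-- ===== PORT B =====
def has_lines_within_window_py_alt (line_lists : List (List Int)) (window : Int) : Bool :=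
  let anchors := PySem.List.sorted (PySem.Set.ofList (line_lists.flatMap (fun lines => lines))) (fun x => x)
  anchors.any (fun anchor =>
    line_lists.all (fun lines =>
      lines.any (fun x => decide (anchor ≤ x) && decide (x ≤ anchor + window))))

-- ===== PRECONDITION & SPEC =====
def Spec_has_lines_within_window_py (line_lists : List (List Int)) (window : Int) (out : Bool) : Prop := out = has_lines_within_window_py_alt line_lists window
instance (line_lists : List (List Int)) (window : Int) (out : Bool) : Decidable (Spec_has_lines_within_window_py line_lists window out) := by unfold Spec_has_lines_within_window_py; infer_instance

-- ===== CLAIM (what is proved, stated in full; the proofs are below) =====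
def Claim_equal_has_lines_within_window_py : Prop := ∀ (line_lists : List (List Int)) (window : Int), Dom_has_lines_within_window_py line_lists window → Spec_has_lines_within_window_py line_lists window (has_lines_within_window_py line_lists window)

-- ===== LEMMAS AND PROOFS =====

-- the common mathematical specification: some line L of some term has, for every term,
-- a line in [L, L + window]
def pvSpecS (line_lists : List (List Int)) (window : Int) : Prop :=
  ∃ L ∈ line_lists.flatMap (fun lines => lines),
    ∀ lines ∈ line_lists, ∃ x ∈ lines, L ≤ x ∧ x ≤ L + window

-- index views of the sorted event list
def pvLineAt (es : List (Int × Int)) (k : Nat) : Int := (es.getD k (0, 0)).1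
def pvSeg (es : List (Int × Int)) (l r : Nat) : List (Int × Int) := (es.take r).drop l

def pvCovSeg (es : List (Int × Int)) (T : Nat) (l r : Nat) : Prop :=
  ∀ t : Nat, t < T → (pvSeg es l r).any (fun p => p.2 == (t : Int)) = true

-- a qualifying window of sorted events ending at index r - 1
def pvGoodEnd (es : List (Int × Int)) (T : Nat) (window : Int) (r : Nat) : Prop :=
  ∃ l : Nat, l < r ∧ pvCovSeg es T l r ∧ pvLineAt es (r - 1) - pvLineAt es l ≤ window

-- loop invariant entering the outer loop with r events processed
def pvInvAt (es : List (Int × Int)) (T : Nat) (window : Int) (r : Nat)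
    (counts : List Int) (covered : Int) (left : Nat) : Prop :=
  left ≤ r ∧ r ≤ es.length ∧ counts.length = T ∧
  (∀ t : Nat, t < T → counts.getD t 0 = ((pvSeg es left r).countP (fun p => p.2 == (t : Int)) : Int)) ∧
  covered = (((List.range T).countP (fun (t : Nat) => (pvSeg es left r).any (fun p => p.2 == (t : Int)))) : Int) ∧
  (∀ l' : Nat, l' < left → window < pvLineAt es (r - 1) - pvLineAt es l')


theorem pvLineAt_eq (es : List (Int × Int)) (k : Nat) (h : k < es.length) :
    pvLineAt es k = (es[k]).1 := by
  simp [pvLineAt, List.getD, List.getElem?_eq_getElem h]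

theorem pvMem_seg_iff (es : List (Int × Int)) (l r : Nat) (p : Int × Int) :
    p ∈ pvSeg es l r ↔ ∃ k : Nat, l ≤ k ∧ k < r ∧ ∃ h : k < es.length, es[k] = p := by
  unfold pvSeg
  rw [List.mem_iff_getElem]
  constructor
  · rintro ⟨i, hi, rfl⟩
    have hlen := hi
    simp only [List.length_drop, List.length_take] at hlen
    refine ⟨l + i, by omega, by omega, by omega, ?_⟩
    rw [List.getElem_drop, List.getElem_take]
  · rintro ⟨k, hlk, hkr, hk, rfl⟩
    refine ⟨k - l, ?_, ?_⟩
    · simp only [List.length_drop, List.length_take]; omega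
    · rw [List.getElem_drop, List.getElem_take]
      congr 1; omega

theorem pvSeg_snoc (es : List (Int × Int)) (l r : Nat) (hlr : l ≤ r) (hr : r < es.length) :
    pvSeg es l (r + 1) = pvSeg es l r ++ [es[r]] := by
  unfold pvSeg
  rw [List.take_add_one, List.getElem?_eq_getElem hr]
  simp only [Option.toList_some]
  rw [List.drop_append_of_le_length (by simp [List.length_take]; omega)]

theorem pvSeg_cons (es : List (Int × Int)) (l r : Nat) (hl : l < r) (hr : r ≤ es.length) :
    pvSeg es l r = es[l]'(by omega) :: pvSeg es (l + 1) r := by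
  unfold pvSeg
  rw [List.drop_eq_getElem_cons (by simp [List.length_take]; omega)]
  congr 1
  rw [List.getElem_take]

theorem pvLineAt_mono (es : List (Int × Int)) (hs : es.Pairwise (fun a b => a.1 ≤ b.1))
    (k1 k2 : Nat) (h12 : k1 ≤ k2) (h2 : k2 < es.length) :
    pvLineAt es k1 ≤ pvLineAt es k2 := by
  rw [pvLineAt_eq es k1 (by omega), pvLineAt_eq es k2 h2]
  rcases Nat.eq_or_lt_of_le h12 with rfl | hlt
  · exact le_refl _
  · exact (List.pairwise_iff_getElem.1 hs) k1 k2 (by omega) h2 hlt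

theorem pvCountP_prefix (es : List (Int × Int)) (hs : es.Pairwise (fun a b => a.1 ≤ b.1))
    (q : Int → Bool) (hq : ∀ x y : Int, x ≤ y → q y = true → q x = true)
    (k : Nat) (hk : k < es.length) :
    (q (es[k]).1 = true) ↔ k < es.countP (fun p => q p.1) := by
  induction es generalizing k with
  | nil => simp at hk
  | cons a es ih =>
    have ha : ∀ p ∈ es, a.1 ≤ p.1 := fun p hp => (List.pairwise_cons.1 hs).1 p hp
    have hs' := (List.pairwise_cons.1 hs).2
    by_cases hqa : q a.1 = true
    · cases k with
      | zero => simp [List.countP_cons, hqa]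
      | succ k =>
        simp only [List.getElem_cons_succ]
        rw [ih hs' k (by simpa using hk)]
        simp [List.countP_cons, hqa]
    · have hz : es.countP (fun p => q p.1) = 0 := by
        rw [List.countP_eq_zero]
        intro p hp
        cases hqp : q p.1
        · simp
        · exact absurd (hq a.1 p.1 (ha p hp) hqp) hqa
      cases k with
      | zero => simp [List.countP_cons, hqa, hz]
      | succ k =>
        have hk' : k < es.length := by simpa using hk
        have hfalse : q ((es[k]'hk').1) = false := by
          cases hqp : q ((es[k]'hk').1)
          · rfl
          · exact absurd (hq a.1 _ (ha _ (List.getElem_mem hk')) hqp) hqa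
        simp [List.countP_cons, hqa, hz, hfalse]

theorem pvCountP_congr_except (l : List Nat) (t0 : Nat) (hn : l.Nodup) (ht : t0 ∈ l)
    (f g : Nat → Bool) (h : ∀ t ∈ l, t ≠ t0 → f t = g t) :
    l.countP g + (if f t0 = true then 1 else 0) = l.countP f + (if g t0 = true then 1 else 0) := by
  induction l with
  | nil => simp at ht
  | cons a l ih =>
    by_cases hat : a = t0
    · subst hat
      have hnotin : a ∉ l := (List.nodup_cons.1 hn).1
      have hcongr : l.countP g = l.countP f := by
        apply List.countP_congr
        intro t htl
        rw [h t (List.mem_cons_of_mem _ htl) (fun hEq => hnotin (hEq ▸ htl))]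
      rw [List.countP_cons, List.countP_cons, hcongr]
      by_cases hf : f a = true <;> by_cases hg : g a = true <;> simp [hf, hg]
    · have ht' : t0 ∈ l := by
        rcases List.mem_cons.1 ht with hEq | ht'
        · exact absurd hEq.symm hat
        · exact ht'
      have hfa := h a (List.mem_cons_self ..) hat
      rw [List.countP_cons, List.countP_cons, hfa]
      have := ih (List.nodup_cons.1 hn).2 ht' (fun t htl hne' => h t (List.mem_cons_of_mem _ htl) hne')
      omega

theorem pvCovered_eq_T_iff (es : List (Int × Int)) (T : Nat) (l r : Nat) :
    ((List.range T).countP (fun (t : Nat) => (pvSeg es l r).any (fun p => p.2 == (t : Int))) = T) ↔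
      pvCovSeg es T l r := by
  have hlen : (List.range T).length = T := List.length_range
  constructor
  · intro h t ht
    exact List.countP_eq_length.mp (by rw [h, hlen]) t (List.mem_range.2 ht)
  · intro h
    have : (List.range T).countP (fun (t : Nat) => (pvSeg es l r).any (fun p => p.2 == (t : Int)))
        = (List.range T).length :=
      List.countP_eq_length.mpr (fun t htl => h t (List.mem_range.1 htl))
    rw [this, hlen]

theorem pvAny_seg_mono (es : List (Int × Int)) (left l r : Nat) (h : left ≤ l)
    (p : Int × Int → Bool) (ha : (pvSeg es l r).any p = true) :
    (pvSeg es left r).any p = true := by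
  rw [List.any_eq_true] at ha ⊢
  obtain ⟨x, hx, hpx⟩ := ha
  obtain ⟨k, hlk, hkr, hk, hke⟩ := (pvMem_seg_iff es l r x).1 hx
  exact ⟨x, (pvMem_seg_iff es left r x).2 ⟨k, by omega, hkr, hk, hke⟩, hpx⟩

theorem pvCovered_of_covSeg (es : List (Int × Int)) (T : Nat) (l r : Nat)
    (h : pvCovSeg es T l r) :
    (((List.range T).countP (fun (t : Nat) => (pvSeg es l r).any (fun p => p.2 == (t : Int)))) : Int) = (T : Int) := by
  have h2 := (pvCovered_eq_T_iff es T l r).2 h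
  exact_mod_cast h2

theorem pvNoGoodEnd_of_exit (es : List (Int × Int)) (T : Nat) (window : Int) (r : Nat)
    (counts : List Int) (covered : Int) (left : Nat)
    (hInv : pvInvAt es T window (r + 1) counts covered left)
    (hexit : ¬(covered = (T : Int) ∧ left ≤ r)) :
    ¬ pvGoodEnd es T window (r + 1) := by
  rintro ⟨l, hlr, hcov, hspan⟩
  obtain ⟨hle, hrlen, hclen, hcnt, hcovd, hP⟩ := hInv
  by_cases hll : l < left
  · have := hP l hll
    simp only [Nat.add_sub_cancel] at this hspan
    omega
  · rw [Nat.not_lt] at hll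
    have hcovseg : pvCovSeg es T left (r + 1) :=
      fun t ht => pvAny_seg_mono es left l (r + 1) hll _ (hcov t ht)
    have hcT : covered = (T : Int) := by
      rw [hcovd]; exact pvCovered_of_covSeg es T left (r + 1) hcovseg
    have : ¬ left ≤ r := fun h => hexit ⟨hcT, h⟩
    omega

theorem pvGetD_set (l : List Int) (i j : Nat) (v : Int) (hi : i < l.length) :
    (l.set i v).getD j 0 = if j = i then v else l.getD j 0 := by
  rcases eq_or_ne j i with rfl | h
  · simp [List.getD, List.getElem?_set, hi]
  · simp [List.getD, List.getElem?_set, h, Ne.symm h]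

theorem pvAny_countP_zero (s : List (Int × Int)) (t : Int) :
    (s.any (fun p => p.2 == t) = false) ↔ s.countP (fun p => p.2 == t) = 0 := by
  rw [← Bool.not_eq_true, List.any_eq_true, List.countP_eq_zero]
  constructor
  · intro h p hp
    simp only [Bool.not_eq_true]
    by_contra hb
    exact h ⟨p, hp, by simpa using hb⟩
  · rintro h ⟨p, hp, hpt⟩
    exact absurd hpt (by simpa using h p hp)

theorem pvShrink_spec (es : List (Int × Int)) (T : Nat) (window : Int) (r : Nat)
    (hs : es.Pairwise (fun a b => a.1 ≤ b.1))
    (hterm : ∀ p ∈ es, ∃ t : Nat, t < T ∧ p.2 = (t : Int))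
    (hr : r < es.length) :
    ∀ (n left : Nat) (counts : List Int) (covered : Int),
      r + 1 - left ≤ n →
      pvInvAt es T window (r + 1) counts covered left →
      (pvAShrink es window (T : Int) (pvLineAt es r) r counts covered left = none ↔
        pvGoodEnd es T window (r + 1)) ∧
      (∀ c cov l, pvAShrink es window (T : Int) (pvLineAt es r) r counts covered left = some (c, cov, l) →
        pvInvAt es T window (r + 1) c cov l ∧ ¬(cov = (T : Int) ∧ l ≤ r)) := by
  intro n
  induction n with
  | zero =>
    intro left counts covered hn hInv
    have hnle : ¬ (left ≤ r) := by omega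
    have hcond : ¬ (covered = (T : Int) ∧ left ≤ r) := fun h => hnle h.2
    rw [pvAShrink]
    rw [dif_neg hcond]
    refine ⟨iff_of_false (by simp) (pvNoGoodEnd_of_exit es T window r counts covered left hInv hcond), ?_⟩
    intro c cov l h
    simp only [Option.some.injEq, Prod.mk.injEq] at h
    obtain ⟨rfl, rfl, rfl⟩ := h
    exact ⟨hInv, hcond⟩
  | succ n ihn =>
    intro left counts covered hn hInv
    rw [pvAShrink]
    by_cases hcond : covered = (T : Int) ∧ left ≤ r
    · rw [dif_pos hcond]
      obtain ⟨hle, hrlen, hclen, hcnt, hcovd, hP⟩ := hInv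
      have hleftlen : left < es.length := by omega
      have hcovseg : pvCovSeg es T left (r + 1) := by
        apply (pvCovered_eq_T_iff es T left (r + 1)).1
        have h1 := hcond.1
        rw [hcovd] at h1
        exact_mod_cast h1
      simp only [PySem.List.pyGetD_natCast]
      by_cases hspan : pvLineAt es r - (es.getD left ((0 : Int), (0 : Int))).1 ≤ window
      · rw [if_pos hspan]
        have hspan' : pvLineAt es r - pvLineAt es left ≤ window := hspan
        refine ⟨iff_of_true rfl ⟨left, by omega, hcovseg, ?_⟩, ?_⟩
        · simpa [Nat.add_sub_cancel] using hspan'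
        · intro c cov l h
          exact absurd h (by simp)
      · rw [if_neg hspan]
        have hspan' : ¬ (pvLineAt es r - pvLineAt es left ≤ window) := hspan
        obtain ⟨t0, ht0T, ht0⟩ := hterm (es[left]'hleftlen) (List.getElem_mem hleftlen)
        have hgd2 : (es.getD left ((0 : Int), (0 : Int))).2 = ((t0 : Nat) : Int) := by
          rw [List.getD_eq_getElem es _ hleftlen]
          exact ht0
        rw [hgd2]
        simp only [PySem.List.pyGetD_natCast, PySem.List.pySetD_natCast]
        have hseg : pvSeg es left (r + 1) = (es[left]'hleftlen) :: pvSeg es (left + 1) (r + 1) :=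
          pvSeg_cons es left (r + 1) (by omega) (by omega)
        have hcntL : counts.getD t0 0 =
            ((pvSeg es left (r + 1)).countP (fun p => p.2 == ((t0 : Nat) : Int)) : Int) :=
          hcnt t0 ht0T
        have hcons : (pvSeg es left (r + 1)).countP (fun p => p.2 == ((t0 : Nat) : Int)) =
            (pvSeg es (left + 1) (r + 1)).countP (fun p => p.2 == ((t0 : Nat) : Int)) + 1 := by
          rw [hseg, List.countP_cons]
          simp [ht0]
        set f : Nat → Bool := fun t => (pvSeg es left (r + 1)).any (fun p => p.2 == (t : Int)) with hf
        set g : Nat → Bool := fun t => (pvSeg es (left + 1) (r + 1)).any (fun p => p.2 == (t : Int)) with hg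
        have hfg : ∀ t ∈ List.range T, t ≠ t0 → f t = g t := by
          intro t _ htne
          rw [hf, hg, hseg]
          simp only [List.any_cons]
          have : ((es[left]'hleftlen).2 == ((t : Nat) : Int)) = false := by
            rw [ht0]
            simp only [beq_eq_false_iff_ne, ne_eq, Int.natCast_inj]
            exact fun hEq => htne hEq.symm
          rw [this]
          simp
        have hft0 : f t0 = true := hcovseg t0 ht0T
        have hkey := pvCountP_congr_except (List.range T) t0 List.nodup_range
          (List.mem_range.2 ht0T) f g hfg
        rw [hft0] at hkey
        simp only [if_pos rfl] at hkey
        have hcz := pvAny_countP_zero (pvSeg es (left + 1) (r + 1)) ((t0 : Nat) : Int)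
        have hInv' : pvInvAt es T window (r + 1)
            (counts.set t0 (counts.getD t0 0 - 1))
            (if (counts.set t0 (counts.getD t0 0 - 1)).getD t0 0 = 0 then covered - 1 else covered)
            (left + 1) := by
          have hsetv : (counts.set t0 (counts.getD t0 0 - 1)).getD t0 0 = counts.getD t0 0 - 1 := by
            rw [pvGetD_set counts t0 t0 _ (by omega), if_pos rfl]
          refine ⟨by omega, by omega, by simp [hclen], ?_, ?_, ?_⟩
          · intro t ht
            rw [pvGetD_set counts t0 t _ (by omega)]
            rcases eq_or_ne t t0 with rfl | htne
            · rw [if_pos rfl, hcntL, hcons]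
              push_cast
              ring
            · rw [if_neg htne, hcnt t ht, hseg, List.countP_cons]
              have : ((es[left]'hleftlen).2 == ((t : Nat) : Int)) = false := by
                rw [ht0]
                simp only [beq_eq_false_iff_ne, ne_eq, Int.natCast_inj]
                exact fun hEq => htne hEq.symm
              simp [this]
          · rw [hsetv, hcovd, ← hg]
            by_cases hz : (pvSeg es (left + 1) (r + 1)).countP (fun p => p.2 == ((t0 : Nat) : Int)) = 0
            · rw [if_pos (by rw [hcntL, hcons, hz]; simp)]
              have hgt0 : g t0 = false := by
                have : ((pvSeg es (left + 1) (r + 1)).any fun p => p.2 == ((t0 : Nat) : Int)) = false :=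
                  hcz.2 hz
                exact this
              rw [hgt0] at hkey
              simp at hkey
              push_cast
              omega
            · rw [if_neg (by rw [hcntL, hcons]; push_cast; omega)]
              have hgt0 : g t0 = true := by
                cases hge : g t0
                · have : ((pvSeg es (left + 1) (r + 1)).any fun p => p.2 == ((t0 : Nat) : Int)) = false := hge
                  rw [hcz] at this
                  exact absurd this hz
                · rfl
              rw [hgt0] at hkey
              simp at hkey
              push_cast
              omega
          · intro l' hl'
            rcases Nat.lt_or_ge l' left with hll | hgl
            · exact hP l' hll
            · have hleq : l' = left := by omega
              subst hleq
              simp only [Nat.add_sub_cancel]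
              omega
        exact ihn (left + 1) _ _ (by omega) hInv'
    · rw [dif_neg hcond]
      refine ⟨iff_of_false (by simp) (pvNoGoodEnd_of_exit es T window r counts covered left
        ⟨hInv.1, hInv.2.1, hInv.2.2.1, hInv.2.2.2.1, hInv.2.2.2.2.1, hInv.2.2.2.2.2⟩ hcond), ?_⟩
      intro c cov l h
      simp only [Option.some.injEq, Prod.mk.injEq] at h
      obtain ⟨rfl, rfl, rfl⟩ := h
      exact ⟨hInv, hcond⟩

theorem pvScan_spec (es : List (Int × Int)) (T : Nat) (window : Int)
    (hs : es.Pairwise (fun a b => a.1 ≤ b.1))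
    (hterm : ∀ p ∈ es, ∃ t : Nat, t < T ∧ p.2 = (t : Int)) :
    ∀ (rest : List (Int × Int)) (r : Nat) (counts : List Int) (covered : Int) (left : Nat),
      es.drop r = rest →
      pvInvAt es T window r counts covered left →
      (pvAScan es window (T : Int) rest r counts covered left = true ↔
        ∃ r' : Nat, r < r' ∧ r' ≤ es.length ∧ pvGoodEnd es T window r') := by
  intro rest
  induction rest with
  | nil =>
    intro r counts covered left hdrop hInv
    have hlen : es.length ≤ r := List.drop_eq_nil_iff.1 hdrop
    simp only [pvAScan]
    constructor
    · intro h; exact absurd h (by simp)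
    · rintro ⟨r', h1, h2, _⟩; omega
  | cons e rest ih =>
    intro r counts covered left hdrop hInv
    have hrlen : r < es.length := by
      by_contra h
      rw [List.drop_eq_nil_iff.2 (by omega)] at hdrop
      simp at hdrop
    have hd := List.drop_eq_getElem_cons hrlen
    rw [hdrop] at hd
    injection hd with he hrest
    obtain ⟨hle, hrlen2, hclen, hcnt, hcovd, hP⟩ := hInv
    obtain ⟨t0, ht0T, ht0⟩ := hterm e (by rw [he]; exact List.getElem_mem hrlen)
    have hline : e.1 = pvLineAt es r := by rw [pvLineAt_eq es r hrlen, ← he]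
    have hseg : pvSeg es left (r + 1) = pvSeg es left r ++ [es[r]] := pvSeg_snoc es left r hle hrlen
    have hesr2 : (es[r]'hrlen).2 = ((t0 : Nat) : Int) := by rw [← he]; exact ht0
    simp only [pvAScan]
    rw [ht0, hline]
    simp only [PySem.List.pyGetD_natCast, PySem.List.pySetD_natCast]
    set f : Nat → Bool := fun t => (pvSeg es left r).any (fun p => p.2 == (t : Int)) with hf
    set g : Nat → Bool := fun t => (pvSeg es left (r + 1)).any (fun p => p.2 == (t : Int)) with hg
    have hfg : ∀ t ∈ List.range T, t ≠ t0 → f t = g t := by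
      intro t _ htne
      rw [hf, hg, hseg]
      simp only [List.any_append, List.any_cons, List.any_nil]
      have : ((es[r]'hrlen).2 == ((t : Nat) : Int)) = false := by
        rw [hesr2]
        simp only [beq_eq_false_iff_ne, ne_eq, Int.natCast_inj]
        exact fun hEq => htne hEq.symm
      rw [this]
      simp
    have hgt0 : g t0 = true := by
      rw [hg, hseg]
      simp only [List.any_append, List.any_cons, List.any_nil]
      rw [hesr2]
      simp
    have hkey := pvCountP_congr_except (List.range T) t0 List.nodup_range
      (List.mem_range.2 ht0T) f g hfg
    have hcz := pvAny_countP_zero (pvSeg es left r) ((t0 : Nat) : Int)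
    have hft0 : f t0 = true ↔ counts.getD t0 0 ≠ 0 := by
      rw [hcnt t0 ht0T]
      constructor
      · intro h hzero
        have hz0 : (pvSeg es left r).countP (fun p => p.2 == ((t0 : Nat) : Int)) = 0 := by
          exact_mod_cast hzero
        rw [← hcz] at hz0
        have hz0' : f t0 = false := hz0
        rw [h] at hz0'
        exact Bool.noConfusion hz0'
      · intro h
        cases hfe : f t0
        · have hfe' : ((pvSeg es left r).any fun p => p.2 == ((t0 : Nat) : Int)) = false := hfe
          rw [hcz] at hfe'
          exact absurd (by exact_mod_cast hfe') h
        · rfl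
    have hInv1 : pvInvAt es T window (r + 1)
        (counts.set t0 (counts.getD t0 0 + 1))
        (if counts.getD t0 0 = 0 then covered + 1 else covered) left := by
      refine ⟨by omega, by omega, by simp [hclen], ?_, ?_, ?_⟩
      · intro t ht
        rw [pvGetD_set counts t0 t _ (by omega), hseg, List.countP_append]
        rcases eq_or_ne t t0 with rfl | htne
        · rw [if_pos rfl, hcnt t ht]
          have : List.countP (fun p => p.2 == ((t : Nat) : Int)) [es[r]'hrlen] = 1 := by
            simp [hesr2]
          rw [this]
          push_cast
          ring
        · rw [if_neg htne, hcnt t ht]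
          have : List.countP (fun p => p.2 == ((t : Nat) : Int)) [es[r]'hrlen] = 0 := by
            simp only [List.countP_cons, List.countP_nil, hesr2]
            have : (((t0 : Nat) : Int) == ((t : Nat) : Int)) = false := by
              simp only [beq_eq_false_iff_ne, ne_eq, Int.natCast_inj]
              exact fun hEq => htne hEq.symm
            simp [this]
          rw [this]
          push_cast
          ring
      · rw [hcovd, ← hg]
        by_cases hz : counts.getD t0 0 = 0
        · rw [if_pos hz]
          have hft0' : f t0 = false := by
            cases hfe : f t0
            · rfl
            · exact absurd (hft0.1 hfe) (not_not.2 hz)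
          rw [hft0', hgt0] at hkey
          simp at hkey
          push_cast
          omega
        · rw [if_neg hz]
          have hft0' : f t0 = true := hft0.2 hz
          rw [hft0', hgt0] at hkey
          simp at hkey
          push_cast
          omega
      · intro l' hl'
        have h1 := hP l' hl'
        have h2 : pvLineAt es (r - 1) ≤ pvLineAt es r := pvLineAt_mono es hs (r - 1) r (by omega) hrlen
        simp only [Nat.add_sub_cancel]
        omega
    have hspec := pvShrink_spec es T window r hs hterm hrlen (r + 1) left
      (counts.set t0 (counts.getD t0 0 + 1))
      (if counts.getD t0 0 = 0 then covered + 1 else covered) (by omega) hInv1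
    rcases hres : pvAShrink es window (T : Int) (pvLineAt es r) r
        (counts.set t0 (counts.getD t0 0 + 1))
        (if counts.getD t0 0 = 0 then covered + 1 else covered) left with _ | st
    · simp only []
      constructor
      · intro _
        exact ⟨r + 1, by omega, by omega, hspec.1.1 hres⟩
      · intro _; simp
    · simp only []
      obtain ⟨hInv', hexit⟩ := hspec.2 st.1 st.2.1 st.2.2 (by rw [hres])
      rw [ih (r + 1) st.1 st.2.1 st.2.2 hrest.symm hInv']
      have hnog : ¬ pvGoodEnd es T window (r + 1) := by
        intro hgd
        rw [hspec.1.2 hgd] at hres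
        simp at hres
      constructor
      · rintro ⟨r', h1, h2, h3⟩
        exact ⟨r', by omega, h2, h3⟩
      · rintro ⟨r', h1, h2, h3⟩
        rcases eq_or_ne r' (r + 1) with rfl | hne
        · exact absurd h3 hnog
        · exact ⟨r', by omega, h2, h3⟩

theorem pvGood_iff_spec (line_lists : List (List Int)) (window : Int) (es : List (Int × Int))
    (hs : es.Pairwise (fun a b => a.1 ≤ b.1))
    (hchar : ∀ x t, (x, t) ∈ es ↔ ∃ (k : Nat) (hk : k < line_lists.length), t = (k : Int) ∧ x ∈ line_lists[k]) :
    (∃ r' : Nat, 0 < r' ∧ r' ≤ es.length ∧ pvGoodEnd es line_lists.length window r') ↔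
      pvSpecS line_lists window := by
  unfold pvGoodEnd pvCovSeg pvSpecS
  constructor
  · rintro ⟨r', hr0, hrlen, l, hlr, hcov, hspan⟩
    have hllen : l < es.length := by omega
    have hmeml : es[l] ∈ es := List.getElem_mem hllen
    obtain ⟨k0, hk0, hk0t, hk0x⟩ := (hchar es[l].1 es[l].2).1 (by simpa using hmeml)
    refine ⟨es[l].1, List.mem_flatMap.2 ⟨line_lists[k0], List.getElem_mem hk0, hk0x⟩, ?_⟩
    intro lines hlines
    obtain ⟨t, ht, hteq⟩ := List.mem_iff_getElem.1 hlines
    have hany := hcov t ht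
    rw [List.any_eq_true] at hany
    obtain ⟨p, hp, hpt⟩ := hany
    obtain ⟨k, hlk, hkr, hk, hke⟩ := (pvMem_seg_iff es l r' p).1 hp
    have hpt' : p.2 = (t : Int) := by simpa using hpt
    have hpmem : (p.1, p.2) ∈ es := by
      have := List.getElem_mem hk; rw [hke] at this; simpa using this
    obtain ⟨k', hk', hk't, hk'x⟩ := (hchar p.1 p.2).1 hpmem
    have hk'eq : k' = t := by
      rw [hpt'] at hk't
      exact_mod_cast hk't.symm
    subst hk'eq
    refine ⟨p.1, hteq ▸ hk'x, ?_, ?_⟩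
    · have h1 : pvLineAt es l ≤ pvLineAt es k := pvLineAt_mono es hs l k hlk hk
      rw [pvLineAt_eq es l hllen] at h1
      rw [pvLineAt_eq es k hk, hke] at h1
      exact h1
    · have h2 : pvLineAt es k ≤ pvLineAt es (r' - 1) :=
        pvLineAt_mono es hs k (r' - 1) (by omega) (by omega)
      have h3 : pvLineAt es l ≤ pvLineAt es l := le_refl _
      rw [pvLineAt_eq es k hk, hke] at h2
      rw [pvLineAt_eq es l hllen] at hspan
      omega
  · rintro ⟨L, hL, hall⟩
    obtain ⟨lines0, hlines0, hL0⟩ := List.mem_flatMap.1 hL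
    obtain ⟨k0, hk0, hk0eq⟩ := List.mem_iff_getElem.1 hlines0
    have hql : ∀ (k : Nat) (hk : k < es.length), ((es[k]).1 < L) ↔ k < es.countP (fun p => decide (p.1 < L)) := by
      intro k hk
      have := pvCountP_prefix es hs (fun x => decide (x < L))
        (fun x y hxy hy => by simp at hy ⊢; omega) k hk
      simpa using this
    have hqr : ∀ (k : Nat) (hk : k < es.length), ((es[k]).1 ≤ L + window) ↔ k < es.countP (fun p => decide (p.1 ≤ L + window)) := by
      intro k hk
      have := pvCountP_prefix es hs (fun x => decide (x ≤ L + window))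
        (fun x y hxy hy => by simp at hy ⊢; omega) k hk
      simpa using this
    set l := es.countP (fun p => decide (p.1 < L)) with hldef
    set r' := es.countP (fun p => decide (p.1 ≤ L + window)) with hrdef
    have hwit : ∀ (t : Nat), t < line_lists.length →
        ∃ (k : Nat) (hk : k < es.length), (es[k]).2 = (t : Int) ∧ l ≤ k ∧ k < r' := by
      intro t ht
      obtain ⟨x, hx, hxL, hxW⟩ := hall line_lists[t] (List.getElem_mem ht)
      have hmem : (x, (t : Int)) ∈ es := (hchar x t).2 ⟨t, ht, rfl, hx⟩
      obtain ⟨k, hk, hke⟩ := List.mem_iff_getElem.1 hmem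
      have hke' : es[k] = (x, (t : Int)) := hke
      have h1 : l ≤ k := by
        have := hql k hk
        rw [hke'] at this
        simp only at this
        omega
      have h2 : k < r' := by
        have := hqr k hk
        rw [hke'] at this
        simp only at this
        omega
      exact ⟨k, hk, by rw [hke'], h1, h2⟩
    obtain ⟨kk, hkk, hkkt, hkl, hkr⟩ := hwit k0 hk0
    have hr'len : r' ≤ es.length := List.countP_le_length
    refine ⟨r', by omega, hr'len, l, by omega, ?_, ?_⟩
    · intro t ht
      obtain ⟨k, hk, hkt, h1, h2⟩ := hwit t ht
      rw [List.any_eq_true]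
      exact ⟨es[k], (pvMem_seg_iff es l r' es[k]).2 ⟨k, h1, h2, hk, rfl⟩, by rw [hkt]; simp⟩
    · have hl_lt : l < es.length := by omega
      have hLl : L ≤ pvLineAt es l := by
        rw [pvLineAt_eq es l hl_lt]
        have := hql l hl_lt
        omega
      have hr1 : r' - 1 < es.length := by omega
      have hWr : pvLineAt es (r' - 1) ≤ L + window := by
        rw [pvLineAt_eq es (r' - 1) hr1]
        have := hqr (r' - 1) hr1
        omega
      omega

theorem pvA_iff (line_lists : List (List Int)) (window : Int) :
    has_lines_within_window_py line_lists window = true ↔ pvSpecS line_lists window := by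
  unfold has_lines_within_window_py
  simp only []
  set T := line_lists.length with hT
  set events := (PySem.List.enumerate line_lists).flatMap (fun p => p.2.map (fun l => (l, p.1))) with hev
  set es := PySem.List.sorted events (fun x => x.1) with hes
  have hs : es.Pairwise (fun a b => a.1 ≤ b.1) := PySem.List.sorted_pairwise ..
  have hchar : ∀ x t, (x, t) ∈ es ↔ ∃ (k : Nat) (hk : k < T), t = (k : Int) ∧ x ∈ line_lists[k] := by
    intro x t
    rw [hes, PySem.List.mem_sorted, hev, List.mem_flatMap]
    constructor
    · rintro ⟨q, hq, hxt⟩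
      rw [PySem.List.mem_enumerate_iff] at hq
      obtain ⟨k, hk, rfl⟩ := hq
      simp only [List.mem_map] at hxt
      obtain ⟨l, hl, hlx⟩ := hxt
      injection hlx with h1 h2
      subst h1
      exact ⟨k, hk, by omega, hl⟩
    · rintro ⟨k, hk, rfl, hx⟩
      refine ⟨((0 : Int) + k, line_lists[k]), ?_, ?_⟩
      · rw [PySem.List.mem_enumerate_iff]; exact ⟨k, hk, rfl⟩
      · simp only [List.mem_map]
        exact ⟨x, hx, by simp⟩
  have hterm : ∀ p ∈ es, ∃ t : Nat, t < T ∧ p.2 = (t : Int) := by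
    intro p hp
    obtain ⟨k, hk, hkt, _⟩ := (hchar p.1 p.2).1 (by simpa using hp)
    exact ⟨k, hk, hkt⟩
  have hrep : PySem.List.pyRepeat [(0 : Int)] ((T : Nat) : Int) = List.replicate T (0 : Int) := by
    rw [PySem.List.pyRepeat_singleton]; simp
  have hInv0 : pvInvAt es T window 0 (List.replicate T (0 : Int)) 0 0 := by
    refine ⟨Nat.le_refl 0, Nat.zero_le _, by simp, ?_, ?_, by omega⟩
    · intro t ht
      simp [pvSeg]
    · simp [pvSeg]
  rw [hrep]
  rw [pvScan_spec es T window hs hterm es 0 _ 0 0 rfl hInv0]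
  exact (by
    constructor
    · rintro ⟨r', h0, hlen, hg⟩; exact (pvGood_iff_spec line_lists window es hs hchar).1 ⟨r', h0, hlen, hg⟩
    · intro h
      obtain ⟨r', h0, hlen, hg⟩ := (pvGood_iff_spec line_lists window es hs hchar).2 h
      exact ⟨r', h0, hlen, hg⟩)

theorem pvB_iff (line_lists : List (List Int)) (window : Int) :
    has_lines_within_window_py_alt line_lists window = true ↔ pvSpecS line_lists window := by
  simp [has_lines_within_window_py_alt, pvSpecS, List.any_eq_true, List.all_eq_true,
    PySem.List.mem_sorted, PySem.Set.mem_ofList]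

-- ===== VERDICT (by name: the statement is the Claim_ definition above) =====
theorem has_lines_within_window_py_spec : Claim_equal_has_lines_within_window_py := by
  intro line_lists window _
  unfold Spec_has_lines_within_window_py
  have hA := pvA_iff line_lists window
  have hB := pvB_iff line_lists window
  cases hA' : has_lines_within_window_py line_lists window <;>
    cases hB' : has_lines_within_window_py_alt line_lists window <;> simp_all
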